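-- pv_equiv track=rewrite | github.com/dipnamdev/tkt_genie_api | worker.py | group_adjacent_seats
-- ===== SOURCE A (Python) =====
-- def group_adjacent_seats(seats: list, max_group: int = 4) -> list[list]:
--     """
--     Group seats where i_Id values are consecutive.
--     Confirmed by user: i_Id and serial_No are the best way to determine adjacency.
--     """
--     if not seats:
--         return []
--
--     # sort by i_Id for consecutiveness check
--     seats = sorted(seats, key=lambda s: s["i_Id"])
--
--     groups = []
--     current = [seats[0]]
--
--     for i in range(1, len(seats)):
--         prev = seats[i - 1]
--         curr = seats[i]
--
--         is_consecutive = curr["i_Id"] == prev["i_Id"] + 1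
--         fits           = len(current) < max_group
--
--         if is_consecutive and fits:
--             current.append(curr)
--         else:
--             groups.append(current)
--             current = [curr]
--
--     groups.append(current)
--     return groups
-- ===== SOURCE B (Python) =====
-- def group_adjacent_seats(seats: list, max_group: int = 4) -> list[list]:
--     """Two-phase re-implementation: split the sorted seats into maximal
--     consecutive-i_Id runs, then cut each run into chunks of at most max_group
--     (counting cut: a chunk is flushed as soon as it reaches max_group seats,
--     so max_group <= 0 yields singleton groups, as in the original)."""
--     ss = sorted(seats, key=lambda s: s["i_Id"])
--
--     # Phase 1: maximal runs of consecutive i_Id (max_group ignored here).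
--     runs = []
--     for s in ss:
--         if runs and s["i_Id"] == runs[-1][-1]["i_Id"] + 1:
--             runs[-1].append(s)
--         else:
--             runs.append([s])
--
--     # Phase 2: cut every run into chunks of at most max_group seats.
--     out = []
--     for run in runs:
--         chunk = []
--         for s in run:
--             chunk.append(s)
--             if len(chunk) >= max_group:
--                 out.append(chunk)
--                 chunk = []
--         if chunk:
--             out.append(chunk)
--     return out
-- ===== Notes on version B (the rewrite author's own statement) =====
-- stated objective: alternative
-- what changed: Single stateful scan carrying (groups, current, fits) is replaced by a two-phase decomposition: first split the sorted seats into maximal consecutive-i_Id runs (ignoring max_group), then cut each run into chunks of at most max_group by counting.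
import Mathlib
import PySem

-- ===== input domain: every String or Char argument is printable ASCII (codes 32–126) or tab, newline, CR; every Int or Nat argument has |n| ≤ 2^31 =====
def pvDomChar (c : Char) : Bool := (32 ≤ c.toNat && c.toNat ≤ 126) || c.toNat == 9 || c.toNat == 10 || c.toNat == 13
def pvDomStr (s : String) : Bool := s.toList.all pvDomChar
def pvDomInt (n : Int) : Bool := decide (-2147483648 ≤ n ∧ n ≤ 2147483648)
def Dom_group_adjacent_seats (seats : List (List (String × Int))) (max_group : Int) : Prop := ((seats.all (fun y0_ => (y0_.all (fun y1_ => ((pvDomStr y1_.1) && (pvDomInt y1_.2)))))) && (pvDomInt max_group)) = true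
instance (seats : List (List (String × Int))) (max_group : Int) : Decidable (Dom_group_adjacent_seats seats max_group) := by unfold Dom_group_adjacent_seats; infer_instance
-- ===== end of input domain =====

-- B replaces A's single stateful scan by a two-phase decomposition (maximal consecutive runs,
-- then counted chunks of at most max_group); alternative structure, same cost. Return value only
-- (neither program mutates its argument).

-- s["i_Id"]: first match in the seat's association list; Pre_ guarantees the key is present,
-- so the .getD 0 default is never the value used on admitted inputs.
def seatKey (s : List (String × Int)) : Int := ((PySem.Dict.mk s).get? "i_Id").getD 0

-- ===== PORT A =====
-- the for-loop over range(1, len(seats)): structural recursion carrying prev, groups, current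
def loopA (mg : Int) (prev : List (String × Int)) (rest : List (List (String × Int)))
    (groups : List (List (List (String × Int)))) (current : List (List (String × Int))) :
    List (List (List (String × Int))) :=
  match rest with
  | [] => groups ++ [current]
  | curr :: rest' =>
    if seatKey curr = seatKey prev + 1 ∧ (current.length : Int) < mg then
      loopA mg curr rest' groups (current ++ [curr])
    else
      loopA mg curr rest' (groups ++ [current]) [curr]

def group_adjacent_seats (seats : List (List (String × Int))) (max_group : Int) : List (List (List (String × Int))) :=
  if seats = [] then []
  else
    match PySem.List.sorted seats (key := seatKey) with
    | [] => []   -- unreachable: sorted of a nonempty list is nonempty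
    | s0 :: srest => loopA max_group s0 srest [] [s0]

-- ===== PORT B =====
-- Phase 1: split into maximal consecutive-i_Id runs. runGo p ys = (continuation of p's run, later runs)
def runGo (p : List (String × Int)) (ys : List (List (String × Int))) :
    List (List (String × Int)) × List (List (List (String × Int))) :=
  match ys with
  | [] => ([], [])
  | y :: ys' =>
    if seatKey y = seatKey p + 1 then (y :: (runGo y ys').1, (runGo y ys').2)
    else ([], (y :: (runGo y ys').1) :: (runGo y ys').2)

def runsOf (xs : List (List (String × Int))) : List (List (List (String × Int))) :=
  match xs with
  | [] => []
  | x :: xs' => (x :: (runGo x xs').1) :: (runGo x xs').2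

-- Phase 2: cut one run into chunks, flushing a chunk as soon as it reaches max_group seats
def chunkGo (mg : Int) (acc : List (List (String × Int))) (xs : List (List (String × Int))) :
    List (List (List (String × Int))) :=
  match xs with
  | [] => if acc = [] then [] else [acc]
  | x :: xs' =>
    let acc' := acc ++ [x]
    if mg ≤ (acc'.length : Int) then acc' :: chunkGo mg [] xs' else chunkGo mg acc' xs'

def group_adjacent_seats_alt (seats : List (List (String × Int))) (max_group : Int) : List (List (List (String × Int))) :=
  (runsOf (PySem.List.sorted seats (key := seatKey))).flatMap (chunkGo max_group [])

-- ===== PRECONDITION & SPEC =====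
-- Pre_ excludes exactly the inputs where some seat lacks the "i_Id" key, on which A raises KeyError.
def Pre_group_adjacent_seats (seats : List (List (String × Int))) (max_group : Int) : Prop :=
  ∀ s ∈ seats, ((PySem.Dict.mk s).get? "i_Id").isSome
instance (seats : List (List (String × Int))) (max_group : Int) : Decidable (Pre_group_adjacent_seats seats max_group) := by unfold Pre_group_adjacent_seats; infer_instance
def pvWitness_group_adjacent_seats : (List (List (String × Int))) × Int :=
  ([[("i_Id", 3), ("serial_No", 1)], [("i_Id", 4), ("serial_No", 2)], [("i_Id", 7), ("serial_No", 3)]], 2)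

def Spec_group_adjacent_seats (seats : List (List (String × Int))) (max_group : Int) (out : List (List (List (String × Int)))) : Prop := out = group_adjacent_seats_alt seats max_group
instance (seats : List (List (String × Int))) (max_group : Int) (out : List (List (List (String × Int)))) : Decidable (Spec_group_adjacent_seats seats max_group out) := by unfold Spec_group_adjacent_seats; infer_instance

-- ===== CLAIM (what is proved, stated in full; the proofs are below) =====
def Claim_equal_group_adjacent_seats : Prop := ∀ (seats : List (List (String × Int))) (max_group : Int), Dom_group_adjacent_seats seats max_group → Pre_group_adjacent_seats seats max_group → Spec_group_adjacent_seats seats max_group (group_adjacent_seats seats max_group)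

-- ===== LEMMAS AND PROOFS =====

-- "open chunk" continuation: B's chunker state corresponding to A's pending current
def contChunk (mg : Int) (acc : List (List (String × Int))) (c : List (List (String × Int))) :
    List (List (List (String × Int))) :=
  if mg ≤ (acc.length : Int) then acc :: chunkGo mg [] c else chunkGo mg acc c

theorem chunkGo_cons (mg : Int) (acc : List (List (String × Int))) (x : List (String × Int))
    (xs : List (List (String × Int))) :
    chunkGo mg acc (x :: xs) = contChunk mg (acc ++ [x]) xs := by
  simp [chunkGo, contChunk]

theorem contChunk_full (mg : Int) (acc : List (List (String × Int))) (c : List (List (String × Int)))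
    (h : mg ≤ (acc.length : Int)) : contChunk mg acc c = acc :: chunkGo mg [] c := by
  simp [contChunk, h]

theorem contChunk_open (mg : Int) (acc : List (List (String × Int))) (c : List (List (String × Int)))
    (h : ¬ mg ≤ (acc.length : Int)) : contChunk mg acc c = chunkGo mg acc c := by
  simp [contChunk, h]

theorem contChunk_nil (mg : Int) (acc : List (List (String × Int))) (h : acc ≠ []) :
    contChunk mg acc [] = [acc] := by
  by_cases h1 : mg ≤ (acc.length : Int) <;> simp [contChunk, chunkGo, h, h1]

theorem loopA_groups (mg : Int) (rest : List (List (String × Int))) :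
    ∀ (prev : List (String × Int)) (groups : List (List (List (String × Int))))
      (current : List (List (String × Int))),
    loopA mg prev rest groups current = groups ++ loopA mg prev rest [] current := by
  induction rest with
  | nil => intro prev groups current; simp [loopA]
  | cons curr rest' ih =>
    intro prev groups current
    simp only [loopA]
    split_ifs with h
    · rw [ih curr groups (current ++ [curr]), ih curr [] (current ++ [curr])]
    · rw [ih curr (groups ++ [current]) [curr], ih curr ([] ++ [current]) [curr]]
      simp

theorem loopA_eq_contChunk (mg : Int) (rest : List (List (String × Int))) :
    ∀ (prev : List (String × Int)) (current : List (List (String × Int))), current ≠ [] →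
    loopA mg prev rest [] current =
      contChunk mg current (runGo prev rest).1 ++ (runGo prev rest).2.flatMap (chunkGo mg []) := by
  induction rest with
  | nil =>
    intro prev current hne
    simp [loopA, runGo, contChunk_nil mg current hne]
  | cons curr rest' ih =>
    intro prev current hne
    by_cases hc : seatKey curr = seatKey prev + 1
    · by_cases hf : (current.length : Int) < mg
      · rw [loopA, if_pos ⟨hc, hf⟩, ih curr (current ++ [curr]) (by simp)]
        simp only [runGo, hc, if_pos]
        rw [contChunk_open mg current _ (by omega), chunkGo_cons]
      · rw [loopA, if_neg (by tauto), loopA_groups, ih curr [curr] (by simp)]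
        simp only [runGo, hc, if_pos]
        rw [contChunk_full mg current _ (by omega), chunkGo_cons]
        simp
    · rw [loopA, if_neg (by tauto), loopA_groups, ih curr [curr] (by simp)]
      simp only [runGo, hc, if_false]
      rw [contChunk_nil mg current hne]
      simp [chunkGo_cons]

-- ===== VERDICT (by name: the statement is the Claim_ definition above) =====
theorem group_adjacent_seats_spec : Claim_equal_group_adjacent_seats := by
  intro seats mg _ _
  unfold Spec_group_adjacent_seats group_adjacent_seats group_adjacent_seats_alt
  by_cases hs : seats = []
  · simp [hs, PySem.List.sorted, runsOf]
  · rw [if_neg hs]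
    cases hsort : PySem.List.sorted seats (key := seatKey) with
    | nil =>
      exact absurd ((PySem.List.sorted_eq_nil_iff seats seatKey false).mp hsort) hs
    | cons s0 srest =>
      simp only []
      rw [loopA_eq_contChunk mg srest s0 [s0] (by simp)]
      simp only [runsOf, List.flatMap_cons]
      rw [chunkGo_cons]
      simp
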